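-- pv_equiv track=rewrite | github.com/asabryy/Competitve-Programming | CodeForces/266B-QueueSchool/QueueAtSchool.py | moveQueue
-- ===== SOURCE A (Python) =====
-- def moveQueue(size, time, queue):
--     queueList = list(queue)
--     for x in range(int(time)):
--         i = 0
--         while (i<int(size)):
--             if i == 0:
--                 i+=1
--                 continue
--             elif (queueList[i] == 'G') and (queueList[i-1] == 'B'):
--                 queueList[i], queueList[i-1] = queueList[i-1], queueList[i]
--                 i+=1
--             i+=1
--
--
--     return "".join(queueList)
-- ===== SOURCE B (Python) =====
-- def moveQueue(size, time, queue):
--     n = int(size)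
--     t = int(time)
--     if n <= 0 or t <= 0:
--         return queue
--     cs = list(queue)
--     region = cs[:n]
--     rest = cs[n:]
--     out = []
--     run = []
--     for c in region:
--         if c == 'B' or c == 'G':
--             run.append(c)
--         else:
--             out.extend(_settleRun(run, t))
--             out.append(c)
--             run = []
--     out.extend(_settleRun(run, t))
--     return "".join(out + rest)
--
--
-- def _settleRun(run, t):
--     # Girls keep their relative order and drift left through boys, one cell per
--     # second unless the cell is taken; girl k's position after t seconds has the
--     # closed form max_{j<=k} (k-j) + f(p_j, t-(k-j)) with f(p,tau) = p for tau<=0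
--     # and max(p-tau,0) otherwise, so each girl is placed directly, no simulation.
--     ps = [i for i, c in enumerate(run) if c == 'G']
--     res = ['B'] * len(run)
--     for k in range(len(ps)):
--         best = 0
--         for j in range(k + 1):
--             tau = t - (k - j)
--             fj = ps[j] if tau <= 0 else max(ps[j] - tau, 0)
--             best = max(best, (k - j) + fj)
--         res[best] = 'G'
--     return res
-- ===== Notes on version B (the rewrite author's own statement) =====
-- stated objective: faster
-- what changed: B does no step-by-step simulation at all: it splits the first `size` cells into maximal B/G runs separated by immobile other characters and places each girl directly by a closed-form formula for her position after t seconds (max over j<=k of (k-j)+f(p_j,t-(k-j))), so the running time no longer depends on `time`.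
-- outside the precondition, e.g. on moveQueue(3, 1, 'BG'): A returns 'GB', B returns 'GB'; on moveQueue(3, 2, 'BG'): A raises IndexError, B returns 'GB'; on moveQueue(4, 1, 'BGX'): A raises IndexError, B returns 'GBX'
import Mathlib
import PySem

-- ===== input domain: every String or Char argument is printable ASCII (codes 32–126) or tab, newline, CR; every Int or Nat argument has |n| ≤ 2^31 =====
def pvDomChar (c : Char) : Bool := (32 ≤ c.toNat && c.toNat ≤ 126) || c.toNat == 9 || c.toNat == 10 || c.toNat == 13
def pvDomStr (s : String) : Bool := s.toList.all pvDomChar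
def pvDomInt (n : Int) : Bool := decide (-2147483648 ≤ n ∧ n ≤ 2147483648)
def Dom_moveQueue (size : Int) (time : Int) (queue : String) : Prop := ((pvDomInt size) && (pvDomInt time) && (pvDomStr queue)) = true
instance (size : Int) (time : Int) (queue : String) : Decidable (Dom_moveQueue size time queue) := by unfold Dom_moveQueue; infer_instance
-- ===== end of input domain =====

-- B does no per-second simulation: it places every girl directly by a closed-form formula for her
-- position after `time` seconds, per maximal B/G run, so its cost does not depend on `time` (objective: faster).

-- ===== PORT A =====
-- A's inner 'while i < size' loop: i starts at 0, increases by 1 or 2 per iteration, swaps in place.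
-- fuel = size.toNat + 1 iterations always suffice since i strictly increases while i < size.
-- An out-of-range access (Python IndexError, excluded by Pre_) returns the list unchanged.
def passA (size : Int) : Nat → Nat → List Char → List Char
  | 0, _, l => l
  | fuel + 1, i, l =>
    if (i : Int) < size then
      if i = 0 then passA size fuel (i + 1) l
      else
        match l[i]?, l[i - 1]? with
        | some ci, some cp =>
          if ci = 'G' ∧ cp = 'B' then
            passA size fuel (i + 2) ((l.set i cp).set (i - 1) ci)
          else passA size fuel (i + 1) l
        | _, _ => l
    else l

def moveQueue (size : Int) (time : Int) (queue : String) : String :=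
  String.ofList ((List.range time.toNat).foldl (fun l _ => passA size (size.toNat + 1) 0 l) queue.toList)

-- ===== PORT B =====
-- Source B's inner loop over j (the `best` accumulator): girl k's closed-form position in its run
def bestPos (ps : List Int) (t : Int) (k : Nat) : Int :=
  (List.range (k + 1)).foldl
    (fun (best : Int) (j : Nat) =>
      max best (((k : Int) - (j : Int)) +
        (if t - ((k : Int) - (j : Int)) ≤ 0 then ps.getD j 0
         else max (ps.getD j 0 - (t - ((k : Int) - (j : Int)))) 0))) 0

-- Source B's `ps = [i for i, c in enumerate(run) if c == 'G']`
def girlsOf (run : List Char) : List Int :=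
  (PySem.List.enumerate run 0).filterMap (fun ic => if ic.2 = 'G' then some ic.1 else none)

-- Source B's _settleRun: all-'B' list, then each girl written at her computed position
def settleRunB (run : List Char) (t : Int) : List Char :=
  (List.range (girlsOf run).length).foldl
    (fun res k => res.set (bestPos (girlsOf run) t k).toNat 'G')
    (List.replicate run.length 'B')

-- Source B's for-loop body over the region: state = (out, current run)
def walkStep (t : Int) (st : List Char × List Char) (c : Char) : List Char × List Char :=
  if c = 'B' ∨ c = 'G' then (st.1, st.2 ++ [c]) else (st.1 ++ settleRunB st.2 t ++ [c], [])

def moveQueue_alt (size : Int) (time : Int) (queue : String) : String :=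
  if size ≤ 0 ∨ time ≤ 0 then queue
  else
    let cs := queue.toList
    let st := (cs.take size.toNat).foldl (walkStep time) ([], [])
    String.ofList ((st.1 ++ settleRunB st.2 time) ++ cs.drop size.toNat)

-- ===== PRECONDITION & SPEC =====
-- Pre_ excludes time ≥ 1 ∧ size ≥ 2 ∧ size > len(queue): there A's scan pointer usually runs past the end
-- of the list and raises IndexError, and whether it does depends on the simulation itself (a swap at the
-- very last pair skips one index for one pass), so the region has no closed-form raise condition and is
-- excluded wholesale; B computes the final arrangement of the existing characters there.
def Pre_moveQueue (size : Int) (time : Int) (queue : String) : Prop :=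
  time < 1 ∨ size < 2 ∨ size ≤ (queue.toList.length : Int)
instance (size : Int) (time : Int) (queue : String) : Decidable (Pre_moveQueue size time queue) := by
  unfold Pre_moveQueue; infer_instance

def pvWitness_moveQueue : Int × Int × String := (5, 3, "BGBGB")

def Spec_moveQueue (size : Int) (time : Int) (queue : String) (out : String) : Prop := out = moveQueue_alt size time queue
instance (size : Int) (time : Int) (queue : String) (out : String) : Decidable (Spec_moveQueue size time queue out) := by unfold Spec_moveQueue; infer_instance

-- ===== CLAIM (what is proved, stated in full; the proofs are below) =====
def Claim_equal_moveQueue : Prop := ∀ (size : Int) (time : Int) (queue : String), Dom_moveQueue size time queue → Pre_moveQueue size time queue → Spec_moveQueue size time queue (moveQueue size time queue)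

-- ===== LEMMAS AND PROOFS =====

-- proof-side pure form of one simultaneous pass
def stepF : List Char → List Char
  | c1 :: c2 :: rest =>
    if c1 = 'B' ∧ c2 = 'G' then 'G' :: 'B' :: stepF rest else c1 :: stepF (c2 :: rest)
  | [c] => [c]
  | [] => []
termination_by seg => seg.length

-- proof-side pure iteration of passes
def stepIter : Nat → List Char → List Char
  | 0, l => l
  | k + 1, l => stepIter k (stepF l)

theorem stepF_length (seg : List Char) : (stepF seg).length = seg.length := by
  induction seg using stepF.induct with
  | case1 c1 c2 rest h ih => simp [stepF, h, ih]
  | case2 c1 c2 rest h ih => simp [stepF, h] at ih ⊢; omega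
  | case3 c => simp [stepF]
  | case4 => simp [stepF]

theorem stepF_short (seg : List Char) (h : seg.length ≤ 1) : stepF seg = seg := by
  match seg with
  | [] => simp [stepF]
  | [c] => simp [stepF]
  | a :: b :: r => simp at h

theorem stepIter_succ' (k : Nat) (l : List Char) : stepIter (k + 1) l = stepF (stepIter k l) := by
  induction k generalizing l with
  | zero => rfl
  | succ k ih => rw [stepIter, ih, stepIter]

theorem stepIter_length (k : Nat) (l : List Char) : (stepIter k l).length = l.length := by
  induction k generalizing l with
  | zero => rfl
  | succ k ih => rw [stepIter, ih, stepF_length]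

theorem stepIter_fix {l : List Char} (h : stepF l = l) (k : Nat) : stepIter k l = l := by
  induction k with
  | zero => rfl
  | succ k ih => simp [stepIter, h, ih]

-- ---------- A's loops reduce to stepIter ----------

theorem passA_inv (size : Int) (hs2 : 2 ≤ size) :
    ∀ fuel (i : Nat) (l : List Char), 1 ≤ i → (i : Int) ≤ size + 1 → size ≤ (l.length : Int) →
      size.toNat + 1 - i ≤ fuel →
      passA size fuel i l =
        l.take (i - 1) ++ stepF ((l.drop (i - 1)).take (size.toNat - (i - 1))) ++ l.drop size.toNat := by
  intro fuel
  induction fuel with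
  | zero =>
    intro i l h1 h2 h3 hf
    have hi : (size.toNat : Int) = size := by omega
    have : i = size.toNat + 1 := by omega
    subst this
    rw [passA]
    simp [Nat.add_sub_cancel, Nat.sub_self, stepF, List.take_append_drop]
  | succ fuel ih =>
    intro i l h1 h2 h3 hf
    have hlen : size.toNat ≤ l.length := by omega
    by_cases hlt : (i : Int) < size
    · have his : i < size.toNat := by omega
      have hi0 : ¬ i = 0 := by omega
      have hiub : i < l.length := by omega
      have hip : i - 1 < l.length := by omega
      rw [passA, if_pos hlt, if_neg hi0]
      rw [List.getElem?_eq_getElem hiub, List.getElem?_eq_getElem hip]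
      dsimp only
      have hseg : l.drop (i - 1) = l[i - 1] :: l[i] :: l.drop (i + 1) := by
        have e : i - 1 + 1 = i := by omega
        rw [List.drop_eq_getElem_cons hip, e, List.drop_eq_getElem_cons hiub]
      have htk : size.toNat - (i - 1) = (size.toNat - (i + 1)) + 2 := by omega
      by_cases hbg : l[i] = 'G' ∧ l[i - 1] = 'B'
      · rw [if_pos hbg]
        obtain ⟨hG, hB⟩ := hbg
        rw [hG, hB]
        have hPlen : (l.take (i - 1)).length = i - 1 := by
          rw [List.length_take]; omega
        have hseg' : l.drop (i - 1) = 'B' :: 'G' :: l.drop (i + 1) := by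
          rw [hseg, hG, hB]
        have hldec : l = l.take (i - 1) ++ 'B' :: 'G' :: l.drop (i + 1) := by
          conv_lhs => rw [← List.take_append_drop (i - 1) l]
          rw [hseg']
        have hl' : (l.set i 'B').set (i - 1) 'G'
            = (l.take (i - 1) ++ ['G', 'B']) ++ l.drop (i + 1) := by
          conv_lhs => rw [hldec]
          rw [List.set_append, if_neg (by omega), hPlen,
              List.set_append, if_neg (by omega), hPlen]
          have e1 : i - (i - 1) = 1 := by omega
          have e2 : i - 1 - (i - 1) = 0 := by omega
          rw [e1, e2]
          simp
        rw [ih (i + 2) _ (by omega) (by omega) (by simp [hl']; omega) (by omega)]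
        have hQlen : (l.take (i - 1) ++ ['G', 'B']).length = i + 1 := by
          simp [hPlen]; omega
        have hdropi1 : ((l.set i 'B').set (i - 1) 'G').drop (i + 2 - 1) = l.drop (i + 1) := by
          have e : i + 2 - 1 = i + 1 := by omega
          rw [hl', e, List.drop_left' hQlen]
        have htakei1 : ((l.set i 'B').set (i - 1) 'G').take (i + 2 - 1)
            = l.take (i - 1) ++ ['G', 'B'] := by
          have e : i + 2 - 1 = i + 1 := by omega
          rw [hl', e, List.take_left' hQlen]
        have hdrops : ((l.set i 'B').set (i - 1) 'G').drop size.toNat = l.drop size.toNat := by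
          rw [List.drop_set, if_pos (by omega), List.drop_set, if_pos (by omega)]
        rw [hdropi1, htakei1, hdrops, hseg', htk]
        have : ('B' :: 'G' :: l.drop (i + 1)).take ((size.toNat - (i + 1)) + 2)
            = 'B' :: 'G' :: (l.drop (i + 1)).take (size.toNat - (i + 1)) := by
          rw [List.take_succ_cons, List.take_succ_cons]
        rw [this]
        have : stepF ('B' :: 'G' :: (l.drop (i + 1)).take (size.toNat - (i + 1)))
            = 'G' :: 'B' :: stepF ((l.drop (i + 1)).take (size.toNat - (i + 1))) := by
          simp [stepF]
        rw [this]
        simp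
      · rw [if_neg hbg]
        rw [ih (i + 1) l (by omega) (by omega) h3 (by omega)]
        have e0 : i + 1 - 1 = i := by omega
        rw [e0]
        have hsegi : l.drop i = l[i] :: l.drop (i + 1) := List.drop_eq_getElem_cons hiub
        have htki : size.toNat - i = (size.toNat - (i + 1)) + 1 := by omega
        have htki' : size.toNat - (i - 1) = ((size.toNat - (i + 1)) + 1) + 1 := by omega
        rw [htki, htki', hseg, hsegi]
        have e1 : (l[i - 1] :: l[i] :: l.drop (i + 1)).take (((size.toNat - (i + 1)) + 1) + 1)
            = l[i - 1] :: l[i] :: (l.drop (i + 1)).take (size.toNat - (i + 1)) := by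
          rw [List.take_succ_cons, List.take_succ_cons]
        have e2 : (l[i] :: l.drop (i + 1)).take ((size.toNat - (i + 1)) + 1)
            = l[i] :: (l.drop (i + 1)).take (size.toNat - (i + 1)) := by
          rw [List.take_succ_cons]
        rw [e1, e2]
        have hnsw : stepF (l[i - 1] :: l[i] :: (l.drop (i + 1)).take (size.toNat - (i + 1)))
            = l[i - 1] :: stepF (l[i] :: (l.drop (i + 1)).take (size.toNat - (i + 1))) := by
          rw [stepF, if_neg (fun h => hbg ⟨h.2, h.1⟩)]
        rw [hnsw]
        have htkl : l.take i = l.take (i - 1) ++ [l[i - 1]] := by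
          have : i = (i - 1) + 1 := by omega
          conv_lhs => rw [this]
          rw [List.take_succ, List.getElem?_eq_getElem hip]
          rfl
        rw [htkl]
        simp only [List.append_assoc, List.cons_append, List.singleton_append, List.nil_append]
    · rw [passA, if_neg hlt]
      have hsg : ((l.drop (i - 1)).take (size.toNat - (i - 1))).length ≤ 1 := by
        simp [List.length_take]
        omega
      rw [stepF_short _ hsg]
      have hdd : l.drop size.toNat
          = (l.drop (i - 1)).drop (size.toNat - (i - 1)) := by
        rw [List.drop_drop]
        congr 1
        omega
      rw [hdd, List.append_assoc, List.take_append_drop, List.take_append_drop]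

theorem passA_top (size : Int) (hs2 : 2 ≤ size) (l : List Char) (hlen : size ≤ (l.length : Int)) :
    passA size (size.toNat + 1) 0 l = stepF (l.take size.toNat) ++ l.drop size.toNat := by
  rw [passA, if_pos (show ((0:Nat):Int) < size by omega), if_pos rfl]
  simp only [Nat.zero_add]
  rw [passA_inv size hs2 size.toNat 1 l (by omega) (by omega) hlen (by omega)]
  simp

theorem passA_id_le_zero (size : Int) (hs : size ≤ 0) (fuel i : Nat) (l : List Char) :
    passA size (fuel + 1) i l = l := by
  rw [passA, if_neg (by omega)]

theorem passA_id_one (l : List Char) : passA 1 (1 + 1) 0 l = l := by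
  rw [passA, if_pos (by norm_num), if_pos rfl, passA, if_neg (by norm_num)]

theorem foldl_const {α β : Type} (xs : List β) (x : α) :
    xs.foldl (fun a _ => a) x = x := by
  induction xs generalizing x with
  | nil => rfl
  | cons y ys ih => simp [List.foldl, ih]

theorem foldA (size : Int) (hs2 : 2 ≤ size) (cs : List Char) (hlen : size ≤ (cs.length : Int)) :
    ∀ k, (List.range k).foldl (fun l _ => passA size (size.toNat + 1) 0 l) cs
      = stepIter k (cs.take size.toNat) ++ cs.drop size.toNat := by
  intro k
  induction k with
  | zero => simp [stepIter]
  | succ k ih =>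
    rw [List.range_succ, List.foldl_append, ih]
    simp only [List.foldl]
    have hRlen : (stepIter k (cs.take size.toNat)).length = size.toNat := by
      rw [stepIter_length, List.length_take]
      omega
    have hXlen : size ≤ ((stepIter k (cs.take size.toNat) ++ cs.drop size.toNat).length : Int) := by
      simp [hRlen]
      omega
    rw [passA_top size hs2 _ hXlen]
    rw [List.take_left' hRlen, List.drop_left' hRlen, ← stepIter_succ']

-- ---------- the closed-form side ----------

-- the inner term of bestPos, named for the proofs
def fjB (p tau : Int) : Int := if tau ≤ 0 then p else max (p - tau) 0

theorem fjB_nonneg (p tau : Int) (hp : 0 ≤ p) : 0 ≤ fjB p tau := by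
  unfold fjB; split <;> omega

theorem fjB_le_self (p tau : Int) (hp : 0 ≤ p) : fjB p tau ≤ p := by
  unfold fjB; split <;> omega

theorem fjB_succ (p tau : Int) (h : 0 ≤ tau) : fjB p (tau + 1) = max (fjB p tau - 1) 0 := by
  unfold fjB; split_ifs <;> omega

theorem fjB_sub_one_le (p tau : Int) : fjB p tau - 1 ≤ fjB p (tau + 1) := by
  unfold fjB; split_ifs <;> omega

theorem fjB_succ_le (p tau : Int) (hp : 0 ≤ p) : fjB p (tau + 1) ≤ fjB p tau := by
  unfold fjB; split_ifs <;> omega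

-- generic foldl-max lemmas
theorem foldl_max_init_le (f : Nat → Int) (l : List Nat) (init : Int) :
    init ≤ l.foldl (fun b j => max b (f j)) init := by
  induction l generalizing init with
  | nil => simp
  | cons a l ih => exact le_trans (le_max_left _ _) (ih (max init (f a)))

theorem foldl_max_le_of_mem (f : Nat → Int) (l : List Nat) :
    ∀ (init : Int) (j : Nat), j ∈ l → f j ≤ l.foldl (fun b j => max b (f j)) init := by
  induction l with
  | nil => intro init j hj; simp at hj
  | cons a l ih =>
    intro init j hj
    rcases List.mem_cons.mp hj with h | h
    · subst h; exact le_trans (le_max_right _ _) (foldl_max_init_le f l _)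
    · exact ih _ j h


theorem foldl_max_le (f : Nat → Int) (l : List Nat) (c : Int) (h : ∀ j ∈ l, f j ≤ c) :
    ∀ init : Int, init ≤ c → l.foldl (fun b j => max b (f j)) init ≤ c := by
  induction l with
  | nil => intro init h0; simpa
  | cons a l ih =>
    intro init h0
    exact ih (fun j hj => h j (List.mem_cons_of_mem _ hj)) _
      (max_le h0 (h a (List.mem_cons_self)))


-- strictly increasing lists: the gap property on getD
theorem ps_gap (ps : List Int) (hI : ps.Pairwise (· < ·)) :
    ∀ j k : Nat, j ≤ k → k < ps.length → ps.getD j 0 + ((k : Int) - (j : Int)) ≤ ps.getD k 0 := by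
  intro j k hjk hk
  induction k, hjk using Nat.le_induction with
  | base => simp
  | succ k hjk ih =>
    have hk' : k < ps.length := by omega
    have hlt : ps.getD k 0 < ps.getD (k + 1) 0 := by
      rw [List.getD_eq_getElem?_getD, List.getD_eq_getElem?_getD,
        List.getElem?_eq_getElem hk', List.getElem?_eq_getElem hk]
      exact (List.pairwise_iff_getElem.mp hI) k (k + 1) hk' hk (by omega)
    have := ih hk'
    push_cast
    omega

-- the j-th candidate term of bestPos, named for the proofs
def term (ps : List Int) (t : Int) (k j : Nat) : Int :=
  ((k : Int) - (j : Int)) + fjB (ps.getD j 0) (t - ((k : Int) - (j : Int)))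

theorem bestPos_eq_term (ps : List Int) (t : Int) (k : Nat) :
    bestPos ps t k = (List.range (k + 1)).foldl (fun b j => max b (term ps t k j)) 0 := rfl

theorem bestPos_nonneg (ps : List Int) (t : Int) (k : Nat) : 0 ≤ bestPos ps t k := by
  rw [bestPos_eq_term]; exact foldl_max_init_le _ _ _

theorem term_le_bestPos (ps : List Int) (t : Int) (k j : Nat) (hj : j ≤ k) :
    term ps t k j ≤ bestPos ps t k := by
  rw [bestPos_eq_term]
  exact foldl_max_le_of_mem _ _ _ _ (List.mem_range.mpr (by omega))

theorem bestPos_le' (ps : List Int) (t : Int) (k : Nat) (c : Int) (h0 : 0 ≤ c)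
    (h : ∀ j : Nat, j ≤ k → term ps t k j ≤ c) : bestPos ps t k ≤ c := by
  rw [bestPos_eq_term]
  exact foldl_max_le _ _ _ (fun j hj => h j (by have := List.mem_range.mp hj; omega)) _ h0

theorem getD_nonneg (ps : List Int) (h0 : ∀ x ∈ ps, 0 ≤ x) (j : Nat) : 0 ≤ ps.getD j 0 := by
  rw [List.getD_eq_getElem?_getD]
  cases h : ps[j]? with
  | none => simp
  | some v => simpa using h0 v (List.mem_of_getElem? h)

-- exact shift identity: one more girl, one more second
theorem term_shift (ps : List Int) (t : Int) (k j : Nat) :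
    term ps (t + 1) (k + 1) j = term ps t k j + 1 := by
  unfold term
  have e1 : ((k + 1 : Nat) : Int) - (j : Int) = ((k : Int) - (j : Int)) + 1 := by push_cast; ring
  rw [e1]
  have e2 : t + 1 - (((k : Int) - (j : Int)) + 1) = t - ((k : Int) - (j : Int)) := by ring
  rw [e2]
  ring

theorem term_mono_k (ps : List Int) (t : Int) (k j : Nat) (h0 : ∀ x ∈ ps, 0 ≤ x) :
    term ps t k j + 1 ≤ term ps t (k + 1) j := by
  unfold term
  have e1 : ((k + 1 : Nat) : Int) - (j : Int) = ((k : Int) - (j : Int)) + 1 := by push_cast; ring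
  rw [e1]
  have hf := fjB_succ_le (ps.getD j 0) (t - (((k : Int) - (j : Int)) + 1)) (getD_nonneg ps h0 j)
  have e2 : t - (((k : Int) - (j : Int)) + 1) + 1 = t - ((k : Int) - (j : Int)) := by ring
  rw [e2] at hf
  omega

theorem term_le_getD (ps : List Int) (t : Int) (k j : Nat) (hI : ps.Pairwise (· < ·))
    (h0 : ∀ x ∈ ps, 0 ≤ x) (hj : j ≤ k) (hk : k < ps.length) :
    term ps t k j ≤ ps.getD k 0 := by
  have hg := ps_gap ps hI j k hj hk
  have := fjB_le_self (ps.getD j 0) (t - ((k : Int) - (j : Int))) (getD_nonneg ps h0 j)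
  unfold term
  omega

theorem term_diag (ps : List Int) (t : Int) (k : Nat) :
    term ps t k k = fjB (ps.getD k 0) t := by
  unfold term
  rw [sub_self, sub_zero, zero_add]

theorem term_nonneg (ps : List Int) (t : Int) (k j : Nat) (hj : j ≤ k)
    (h0 : ∀ x ∈ ps, 0 ≤ x) : 0 ≤ term ps t k j := by
  have := fjB_nonneg (ps.getD j 0) (t - ((k : Int) - (j : Int))) (getD_nonneg ps h0 j)
  unfold term
  omega

theorem bestPos_zero (ps : List Int) (k : Nat) (hI : ps.Pairwise (· < ·))
    (h0 : ∀ x ∈ ps, 0 ≤ x) (hk : k < ps.length) : bestPos ps 0 k = ps.getD k 0 := by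
  apply le_antisymm
  · exact bestPos_le' ps 0 k _ (getD_nonneg ps h0 k) (fun j hj => term_le_getD ps 0 k j hI h0 hj hk)
  · have h2 := term_le_bestPos ps 0 k k le_rfl
    rw [term_diag] at h2
    have e : fjB (ps.getD k 0) 0 = ps.getD k 0 := by unfold fjB; norm_num
    omega

theorem bestPos_le_getD (ps : List Int) (t : Int) (k : Nat) (hI : ps.Pairwise (· < ·))
    (h0 : ∀ x ∈ ps, 0 ≤ x) (hk : k < ps.length) : bestPos ps t k ≤ ps.getD k 0 := by
  exact bestPos_le' ps t k _ (getD_nonneg ps h0 k) (fun j hj => term_le_getD ps t k j hI h0 hj hk)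

theorem bestPos_strict (ps : List Int) (t : Int) (k : Nat)
    (h0 : ∀ x ∈ ps, 0 ≤ x) :
    bestPos ps t k + 1 ≤ bestPos ps t (k + 1) := by
  have h1 : 1 ≤ bestPos ps t (k + 1) := by
    have h := term_le_bestPos ps t (k + 1) 0 (by omega)
    have hn := term_nonneg ps t k 0 (by omega) h0
    have hm := term_mono_k ps t k 0 h0
    omega
  have : bestPos ps t k ≤ bestPos ps t (k + 1) - 1 := by
    apply bestPos_le' _ _ _ _ (by omega)
    intro j hj
    have h := term_le_bestPos ps t (k + 1) j (by omega)
    have hm := term_mono_k ps t k j h0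
    omega
  omega

theorem bestPos_mono (ps : List Int) (t : Int) (h0 : ∀ x ∈ ps, 0 ≤ x) :
    ∀ i j : Nat, i ≤ j → bestPos ps t i + ((j : Int) - (i : Int)) ≤ bestPos ps t j := by
  intro i j hij
  induction j, hij using Nat.le_induction with
  | base => simp
  | succ j hij ih =>
    have := bestPos_strict ps t j h0
    push_cast
    push_cast at ih
    omega

-- the per-second update on (old-neighbour-aware) positions
def posStep : Int → List Int → List Int
  | _, [] => []
  | prev, a :: rest => (if prev + 2 ≤ a then a - 1 else a) :: posStep a rest

theorem posStep_length (prev : Int) (l : List Int) : (posStep prev l).length = l.length := by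
  induction l generalizing prev with
  | nil => rfl
  | cons a rest ih => simp [posStep, ih]

theorem posStep_lb (c : Int) (l : List Int) (h : ∀ x ∈ l, c ≤ x) :
    ∀ p, ∀ y ∈ posStep p l, c - 1 ≤ y := by
  induction l with
  | nil => intro p y hy; simp [posStep] at hy
  | cons a rest ih =>
    intro p y hy
    rw [posStep] at hy
    rcases List.mem_cons.mp hy with h1 | h1
    · have := h a (List.mem_cons_self)
      subst h1; split <;> omega
  
    · exact ih (fun x hx => h x (List.mem_cons_of_mem _ hx)) a y h1

theorem posStep_lb2 (l : List Int) :
    ∀ p : Int, l.Pairwise (· < ·) → (∀ x ∈ l, p + 1 ≤ x) → ∀ y ∈ posStep p l, p + 1 ≤ y := by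
  induction l with
  | nil => intro p _ _ y hy; simp [posStep] at hy
  | cons a rest ih =>
    intro p hI h y hy
    rw [posStep] at hy
    have ha := h a (List.mem_cons_self)
    rcases List.mem_cons.mp hy with h1 | h1
    · subst h1; split <;> omega
    · have hrest : ∀ x ∈ rest, a + 1 ≤ x := by
        intro x hx
        have := List.rel_of_pairwise_cons hI hx
        omega
      have := ih a (List.Pairwise.of_cons hI) hrest y h1
      omega

-- pointwise view of posStep for a strictly increasing list
theorem posStep_getD (l : List Int) :
    ∀ (prev : Int), (prev :: l).Pairwise (· < ·) →
      ∀ k : Nat, k < l.length →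
        (posStep prev l).getD k 0 =
          max (l.getD k 0 - 1) ((if k = 0 then prev else l.getD (k - 1) 0) + 1) := by
  induction l with
  | nil => intro prev _ k hk; simp at hk
  | cons a rest ih =>
    intro prev hp k hk
    have hpa : prev < a := List.rel_of_pairwise_cons hp (List.mem_cons_self)
    rw [posStep]
    cases k with
    | zero =>
      simp only [List.getD_cons_zero, if_true]
      split <;> omega
    | succ k =>
      simp only [List.getD_cons_succ]
      have := ih a (List.Pairwise.of_cons hp) k (by simpa using hk)
      rw [this]
      cases k with
      | zero => simp
      | succ k => simp

-- the closed form satisfies the per-second recursion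
theorem bestPos_step (ps : List Int) (t : Int) (ht : 0 ≤ t) (k : Nat)
    (h0 : ∀ x ∈ ps, 0 ≤ x) (hk : k < ps.length) :
    bestPos ps (t + 1) k =
      max (bestPos ps t k - 1) ((if k = 0 then (-1 : Int) else bestPos ps t (k - 1)) + 1) := by
  cases k with
  | zero =>
    have e5 : (if (0 : Nat) = 0 then (-1 : Int) else bestPos ps t (0 - 1)) = -1 := by
      norm_num
    rw [e5]
    have e1 : bestPos ps t 0 = max 0 (fjB (ps.getD 0 0) t) := by
      rw [bestPos_eq_term, show List.range 1 = [0] from rfl]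
      simp only [List.foldl_cons, List.foldl_nil]
      rw [term_diag]
    have e2 : bestPos ps (t + 1) 0 = max 0 (fjB (ps.getD 0 0) (t + 1)) := by
      rw [bestPos_eq_term, show List.range 1 = [0] from rfl]
      simp only [List.foldl_cons, List.foldl_nil]
      rw [term_diag]
    rw [e1, e2, fjB_succ _ _ ht]
    have := fjB_nonneg (ps.getD 0 0) t (getD_nonneg ps h0 0)
    omega
  | succ k =>
    simp only [Nat.succ_sub_one, Nat.succ_ne_zero, if_false]
    have hx0 : 0 ≤ bestPos ps t k := bestPos_nonneg ps t k
    apply le_antisymm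
    · apply bestPos_le' _ _ _ _ (by omega)
      intro j hj
      by_cases hjk : j ≤ k
      · have h1 := term_le_bestPos ps t k j hjk
        have h2 := term_shift ps t k j
        omega
      · have hj1 : j = k + 1 := by omega
        subst hj1
        rw [term_diag, fjB_succ _ _ ht]
        have h1 := term_le_bestPos ps t (k + 1) (k + 1) le_rfl
        rw [term_diag] at h1
        omega
    · apply max_le
      · have : bestPos ps t (k + 1) ≤ bestPos ps (t + 1) (k + 1) + 1 := by
          apply bestPos_le' _ _ _ _ (by have := bestPos_nonneg ps (t + 1) (k + 1); omega)
          intro j hj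
          have h1 := term_le_bestPos ps (t + 1) (k + 1) j hj
          have hf := fjB_sub_one_le (ps.getD j 0) (t - (((k + 1 : Nat) : Int) - (j : Int)))
          have e : t - (((k + 1 : Nat) : Int) - (j : Int)) + 1
              = t + 1 - (((k + 1 : Nat) : Int) - (j : Int)) := by ring
          rw [e] at hf
          unfold term at h1 ⊢
          omega
        omega
      · have h1 : 1 ≤ bestPos ps (t + 1) (k + 1) := by
          have h := term_le_bestPos ps (t + 1) (k + 1) 0 (by omega)
          have hn := term_nonneg ps (t + 1) (k + 1) 0 (by omega) h0
          have hd := term_nonneg ps t k 0 (by omega) h0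
          have hs := term_shift ps t k 0
          omega
        have : bestPos ps t k ≤ bestPos ps (t + 1) (k + 1) - 1 := by
          apply bestPos_le' _ _ _ _ (by omega)
          intro j hj
          have h2 := term_le_bestPos ps (t + 1) (k + 1) j (by omega)
          have hs := term_shift ps t k j
          omega
        omega

-- the list of all girl positions after t seconds
def xlist (ps : List Int) (t : Int) : List Int :=
  (List.range ps.length).map (fun k => bestPos ps t k)

theorem xlist_length (ps : List Int) (t : Int) : (xlist ps t).length = ps.length := by
  simp [xlist]

theorem getDI {l : List Int} {n : Nat} (h : n < l.length) : l.getD n 0 = l[n] := by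
  rw [List.getD_eq_getElem?_getD, List.getElem?_eq_getElem h]
  rfl

theorem xlist_getD (ps : List Int) (t : Int) (k : Nat) (hk : k < ps.length) :
    (xlist ps t).getD k 0 = bestPos ps t k := by
  have hk' : k < (xlist ps t).length := by rwa [xlist_length]
  rw [getDI hk']
  simp [xlist]

theorem xlist_zero (ps : List Int) (hI : ps.Pairwise (· < ·)) (h0 : ∀ x ∈ ps, 0 ≤ x) :
    xlist ps 0 = ps := by
  apply List.ext_getElem (by simp [xlist_length])
  intro n h1 h2
  rw [← getDI h1, ← getDI h2, xlist_getD ps 0 n h2, bestPos_zero ps n hI h0 h2]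

theorem xlist_pairwise (ps : List Int) (t : Int) (h0 : ∀ x ∈ ps, 0 ≤ x) :
    (xlist ps t).Pairwise (· < ·) := by
  rw [List.pairwise_iff_getElem]
  intro i j hi hj hij
  simp only [xlist, List.getElem_map, List.getElem_range]
  have := bestPos_mono ps t h0 i j (by omega)
  have hc : (1 : Int) ≤ (j : Int) - (i : Int) := by
    have : i < j := hij
    push_cast
    omega
  omega

theorem xlist_mem_nonneg (ps : List Int) (t : Int) : ∀ x ∈ xlist ps t, 0 ≤ x := by
  intro x hx
  simp only [xlist, List.mem_map, List.mem_range] at hx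
  obtain ⟨k, _, rfl⟩ := hx
  exact bestPos_nonneg ps t k

theorem xlist_mem_lt (ps : List Int) (t : Int) (m : Int) (hI : ps.Pairwise (· < ·))
    (h0 : ∀ x ∈ ps, 0 ≤ x) (hub : ∀ x ∈ ps, x < m) : ∀ x ∈ xlist ps t, x < m := by
  intro x hx
  simp only [xlist, List.mem_map, List.mem_range] at hx
  obtain ⟨k, hk, rfl⟩ := hx
  have h1 := bestPos_le_getD ps t k hI h0 hk
  have h2 : ps.getD k 0 < m := by
    rw [getDI hk]
    exact hub _ (List.getElem_mem hk)
  omega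

theorem posStep_xlist (ps : List Int) (t : Int) (ht : 0 ≤ t)
    (h0 : ∀ x ∈ ps, 0 ≤ x) :
    posStep (-1) (xlist ps t) = xlist ps (t + 1) := by
  have hch : ((-1 : Int) :: xlist ps t).Pairwise (· < ·) := by
    rw [List.pairwise_cons]
    constructor
    · intro y hy
      have := xlist_mem_nonneg ps t y hy
      omega
    · exact xlist_pairwise ps t h0
  apply List.ext_getElem (by rw [posStep_length, xlist_length, xlist_length])
  intro n h1 h2
  have hn : n < ps.length := by rwa [xlist_length] at h2
  rw [← getDI h1, ← getDI h2, xlist_getD ps (t + 1) n hn,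
    posStep_getD (xlist ps t) (-1) hch n (by rwa [xlist_length]),
    xlist_getD ps t n hn, bestPos_step ps t ht n h0 hn]
  congr 2
  cases n with
  | zero => simp
  | succ n =>
    simp only [Nat.succ_ne_zero, if_false, Nat.succ_sub_one]
    exact xlist_getD ps t n (by omega)

-- the cell picture: 'G' exactly at the positions in q
def enc (i : Int) (q : List Int) : Nat → List Char
  | 0 => []
  | m + 1 => (if i ∈ q then 'G' else 'B') :: enc (i + 1) q m

theorem enc_length (q : List Int) : ∀ m i, (enc i q m).length = m := by
  intro m
  induction m with
  | zero => intro i; rfl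
  | succ m ih => intro i; simp [enc, ih]

theorem enc_congr (q q' : List Int) :
    ∀ (m : Nat) (i : Int), (∀ x : Int, i ≤ x → x < i + m → (x ∈ q ↔ x ∈ q')) →
      enc i q m = enc i q' m := by
  intro m
  induction m with
  | zero => intro i _; rfl
  | succ m ih =>
    intro i h
    rw [enc, enc]
    have hi : (i ∈ q) ↔ (i ∈ q') := h i le_rfl (by push_cast; omega)
    congr 1
    · by_cases hq : i ∈ q
      · rw [if_pos hq, if_pos (hi.mp hq)]
      · rw [if_neg hq, if_neg (fun hh => hq (hi.mpr hh))]
    · exact ih (i + 1) (fun x hx1 hx2 => h x (by omega) (by push_cast at hx2 ⊢; omega))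

theorem enc_getElem? (q : List Int) :
    ∀ (m : Nat) (i : Int) (n : Nat),
      (enc i q m)[n]? = if n < m then some (if (i + n) ∈ q then 'G' else 'B') else none := by
  intro m
  induction m with
  | zero => intro i n; simp [enc]
  | succ m ih =>
    intro i n
    cases n with
    | zero => simp [enc]
    | succ n =>
      rw [enc]
      simp only [List.getElem?_cons_succ, ih (i+1) n]
      have e : i + 1 + (n : Int) = i + ((n + 1 : Nat) : Int) := by push_cast; ring
      rw [e]
      by_cases h : n < m
      · rw [if_pos h, if_pos (Nat.succ_lt_succ h)]
      · rw [if_neg h, if_neg (fun hh => h (Nat.lt_of_succ_lt_succ hh))]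

theorem mem_cons_iff_of_ne {x a : Int} {L : List Int} (h : x ≠ a) : (x ∈ a :: L) ↔ x ∈ L := by
  rw [List.mem_cons]
  exact ⟨fun hm => hm.resolve_left h, Or.inr⟩

-- head extraction from a strictly increasing lower-bounded list
theorem head_of_mem_lb (q : List Int) (b : Int) (hI : q.Pairwise (· < ·))
    (hlb : ∀ x ∈ q, b ≤ x) (hb : b ∈ q) : ∃ q', q = b :: q' := by
  cases q with
  | nil => simp at hb
  | cons h t =>
    rcases List.mem_cons.mp hb with h1 | h1
    · exact ⟨t, by rw [h1]⟩
    · have := List.rel_of_pairwise_cons hI h1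
      have := hlb h (List.mem_cons_self)
      omega

-- one simultaneous pass, on the cell picture
theorem stepF_enc : ∀ (m : Nat) (i prev : Int) (q : List Int),
    q.Pairwise (· < ·) → (∀ x ∈ q, i ≤ x ∧ x < i + m) → prev ≤ i - 1 → (i ∈ q → prev = i - 1) →
    stepF (enc i q m) = enc i (posStep prev q) m := by
  intro m
  induction m using Nat.strong_induction_on with
  | _ m IH =>
  intro i prev q hI hb hp hpi
  match m with
  | 0 =>
    cases q with
    | nil => simp [enc, stepF, posStep]
    | cons a q' => exact absurd (hb a (List.mem_cons_self)) (by omega)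
  | 1 =>
    by_cases hiq : i ∈ q
    · obtain ⟨q', rfl⟩ := head_of_mem_lb q i hI (fun x hx => (hb x hx).1) hiq
      have hq' : q' = [] := by
        cases q' with
        | nil => rfl
        | cons b q'' =>
          have h1 := List.rel_of_pairwise_cons hI (List.mem_cons_self (a := b))
          have h2 := hb b (List.mem_cons_of_mem _ (List.mem_cons_self))
          omega
      subst hq'
      have hprev := hpi List.mem_cons_self
      have hps : posStep prev [i] = [i] := by
        rw [posStep, if_neg (by omega), posStep]
      rw [hps]
      exact stepF_short _ (by rw [enc_length])
    · have hq : q = [] := by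
        cases q with
        | nil => rfl
        | cons a q' =>
          have := hb a (List.mem_cons_self)
          have : a = i := by omega
          exact absurd (this ▸ List.mem_cons_self) hiq
      subst hq
      simp [enc, stepF, posStep]
  | m + 2 =>
    have hunf : enc i q (m + 2) = (if i ∈ q then 'G' else 'B') :: (if i + 1 ∈ q then 'G' else 'B') :: enc (i + 2) q m := by
      rw [enc, enc]
      congr 2
      ring_nf
    by_cases hswap : (¬ i ∈ q) ∧ (i + 1 ∈ q)
    · -- swap branch
      obtain ⟨hi0, hi1⟩ := hswap
      have hge : ∀ x ∈ q, i + 1 ≤ x := by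
        intro x hx
        have := (hb x hx).1
        by_cases h : x = i
        · exact absurd (h ▸ hx) hi0
        · omega
      obtain ⟨q', rfl⟩ := head_of_mem_lb q (i+1) hI hge hi1
      have hq'ge : ∀ x ∈ q', i + 2 ≤ x := by
        intro x hx
        have := List.rel_of_pairwise_cons hI hx
        omega
      have hps : posStep prev ((i+1) :: q') = i :: posStep (i+1) q' := by
        rw [posStep, if_pos (by omega)]
        congr 1
        omega
      rw [hunf, if_neg hi0, if_pos hi1]
      rw [stepF, if_pos ⟨rfl, rfl⟩]
      have henc : enc (i+2) ((i+1) :: q') m = enc (i+2) q' m := by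
        apply enc_congr
        intro x hx1 _
        first
        | exact mem_cons_iff_of_ne (by omega)
        | exact (mem_cons_iff_of_ne (by omega)).symm
      rw [henc, IH m (by omega) (i+2) (i+1) q' (List.Pairwise.of_cons hI)
        (fun x hx => ⟨hq'ge x hx, by have := (hb x (List.mem_cons_of_mem _ hx)).2; push_cast at this ⊢; omega⟩)
        (by omega) (fun _ => by omega)]
      rw [hps]
      have hlb2 : ∀ y ∈ posStep (i+1) q', i + 2 ≤ y := by
        intro y hy
        have := posStep_lb2 q' (i+1) (List.Pairwise.of_cons hI)
          (fun x hx => by have := hq'ge x hx; omega) y hy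
        omega
      have hrhs : enc i (i :: posStep (i+1) q') (m+2)
          = 'G' :: 'B' :: enc (i+2) (i :: posStep (i+1) q') m := by
        rw [enc, enc]
        rw [if_pos (List.mem_cons_self)]
        have : ¬ (i + 1 ∈ i :: posStep (i+1) q') := by
          simp only [List.mem_cons]
          rintro (h | h)
          · omega
          · have := hlb2 _ h; omega
        rw [if_neg this]
        congr 2
        ring_nf
      rw [hrhs]
      congr 1
      congr 1
      apply enc_congr
      intro x hx1 _
      first
      | exact mem_cons_iff_of_ne (by omega)
      | exact (mem_cons_iff_of_ne (by omega)).symm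
    · -- no-swap branch
      have hnosw : ¬ ((if i ∈ q then 'G' else 'B') = 'B' ∧ (if i + 1 ∈ q then 'G' else 'B') = 'G') := by
        rintro ⟨h1, h2⟩
        apply hswap
        constructor
        · intro h; rw [if_pos h] at h1; exact absurd h1 (by decide)
        · by_contra h; rw [if_neg h] at h2; exact absurd h2 (by decide)
      have hunf1 : enc (i+1) q (m+1) = (if i + 1 ∈ q then 'G' else 'B') :: enc (i + 2) q m := by
        rw [enc]
        congr 2
        ring_nf
      rw [hunf, stepF, if_neg hnosw, ← hunf1]
      by_cases hiq : i ∈ q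
      · obtain ⟨q', rfl⟩ := head_of_mem_lb q i hI (fun x hx => (hb x hx).1) hiq
        have hprev := hpi List.mem_cons_self
        have hq'ge : ∀ x ∈ q', i + 1 ≤ x := by
          intro x hx
          have := List.rel_of_pairwise_cons hI hx
          omega
        have hps : posStep prev (i :: q') = i :: posStep i q' := by
          rw [posStep, if_neg (by omega)]
        rw [hps]
        have henc : enc (i+1) (i :: q') (m+1) = enc (i+1) q' (m+1) := by
          apply enc_congr
          intro x hx1 _
          constructor
          · intro hm
            rcases List.mem_cons.mp hm with h | h
            · exact absurd h (by omega)
            · exact h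
          · exact fun hm => List.mem_cons_of_mem _ hm
        rw [henc, IH (m+1) (by omega) (i+1) i q' (List.Pairwise.of_cons hI)
          (fun x hx => ⟨hq'ge x hx, by have := (hb x (List.mem_cons_of_mem _ hx)).2; push_cast at this ⊢; omega⟩)
          (by omega) (fun _ => by omega)]
        have hrhs : enc i (i :: posStep i q') (m+2)
            = 'G' :: enc (i+1) (i :: posStep i q') (m+1) := by
          rw [enc, if_pos (List.mem_cons_self)]
        rw [hrhs, if_pos (List.mem_cons_self (a := i))]
        congr 1
        apply enc_congr
        intro x hx1 _
        first
        | exact mem_cons_iff_of_ne (by omega)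
        | exact (mem_cons_iff_of_ne (by omega)).symm
      · have hi1 : ¬ i + 1 ∈ q := by
          intro h
          exact hswap ⟨hiq, h⟩
        have hge2 : ∀ x ∈ q, i + 2 ≤ x := by
          intro x hx
          have := (hb x hx).1
          by_cases h1 : x = i
          · exact absurd (h1 ▸ hx) hiq
          · by_cases h2 : x = i + 1
            · exact absurd (h2 ▸ hx) hi1
            · omega
        rw [IH (m+1) (by omega) (i+1) prev q hI
          (fun x hx => ⟨by have := hge2 x hx; omega, by have := (hb x hx).2; push_cast at this ⊢; omega⟩)
          (by omega) (fun h => absurd h hi1)]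
        have hrhs : enc i (posStep prev q) (m+2)
            = 'B' :: enc (i+1) (posStep prev q) (m+1) := by
          rw [enc]
          have : ¬ i ∈ posStep prev q := by
            intro h
            have := posStep_lb (i+2) q hge2 prev i h
            omega
          rw [if_neg this]
        rw [hrhs, if_neg hiq]

-- iterate the pass = iterate the closed form
theorem stepIter_enc (ps : List Int) (m : Nat) (hI : ps.Pairwise (· < ·))
    (h0 : ∀ x ∈ ps, 0 ≤ x) (hub : ∀ x ∈ ps, x < (m : Int)) :
    ∀ n : Nat, stepIter n (enc 0 ps m) = enc 0 (xlist ps (n : Int)) m := by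
  intro n
  induction n with
  | zero => rw [stepIter, Nat.cast_zero, xlist_zero ps hI h0]
  | succ n ih =>
    rw [stepIter_succ', ih]
    rw [stepF_enc m 0 (-1) (xlist ps (n : Int)) (xlist_pairwise ps _ h0)
      (fun x hx => ⟨xlist_mem_nonneg ps _ x hx, by simpa using xlist_mem_lt ps _ m hI h0 hub x hx⟩)
      (by omega) (fun _ => by omega)]
    rw [posStep_xlist ps (n : Int) (by omega) h0]
    norm_cast

-- girlsOf facts
theorem girlsOf_mem (run : List Char) (x : Int) :
    x ∈ girlsOf run ↔ ∃ (n : Nat) (h : n < run.length), x = (n : Int) ∧ run[n] = 'G' := by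
  unfold girlsOf
  rw [List.mem_filterMap]
  constructor
  · rintro ⟨⟨a, c⟩, hmem, hf⟩
    rw [PySem.List.mem_enumerate_iff] at hmem
    obtain ⟨k, hk, he⟩ := hmem
    have ha : a = (k : Int) := by
      have := congrArg Prod.fst he
      simpa using this
    have hc : c = run[k] := by
      have := congrArg Prod.snd he
      simpa using this
    by_cases hg : c = 'G'
    · rw [if_pos hg] at hf
      have hax := Option.some.inj hf
      exact ⟨k, hk, by omega, by rw [← hc, hg]⟩
    · rw [if_neg hg] at hf
      simp at hf
  · rintro ⟨n, hn, rfl, hG⟩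
    refine ⟨((n : Int), run[n]), ?_, ?_⟩
    · rw [PySem.List.mem_enumerate_iff]
      exact ⟨n, hn, by simp⟩
    · simp [hG]

theorem girlsAux_lb (f : Int × Char → Option Int)
    (hf : ∀ p x, f p = some x → x = p.1) :
    ∀ (run : List Char) (st : Int) (x : Int),
      x ∈ (PySem.List.enumerate run st).filterMap f → st ≤ x := by
  intro run
  induction run with
  | nil => intro st x hx; simp [PySem.List.enumerate_nil] at hx
  | cons c run ih =>
    intro st x hx
    rw [PySem.List.enumerate_cons, List.filterMap_cons] at hx
    cases hfc : f (st, c) with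
    | none =>
      rw [hfc] at hx
      have := ih (st + 1) x hx
      omega
    | some v =>
      rw [hfc] at hx
      rcases List.mem_cons.mp hx with h | h
      · have := hf (st, c) v hfc
        omega
      · have := ih (st + 1) x h
        omega

theorem girlsAux_pairwise (f : Int × Char → Option Int)
    (hf : ∀ p x, f p = some x → x = p.1) :
    ∀ (run : List Char) (st : Int),
      ((PySem.List.enumerate run st).filterMap f).Pairwise (· < ·) := by
  intro run
  induction run with
  | nil => intro st; simp [PySem.List.enumerate_nil]
  | cons c run ih =>
    intro st
    rw [PySem.List.enumerate_cons, List.filterMap_cons]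
    cases hfc : f (st, c) with
    | none => exact ih (st + 1)
    | some v =>
      rw [List.pairwise_cons]
      refine ⟨?_, ih (st + 1)⟩
      intro y hy
      have h1 := girlsAux_lb f hf run (st + 1) y hy
      have h2 := hf (st, c) v hfc
      omega

theorem girlsOf_pairwise (run : List Char) : (girlsOf run).Pairwise (· < ·) := by
  unfold girlsOf
  apply girlsAux_pairwise
  intro p x h
  by_cases hc : p.2 = 'G'
  · rw [if_pos hc] at h
    simpa using h.symm
  · rw [if_neg hc] at h
    simp at h

-- a foldl of in-range sets, pointwise
theorem foldl_set_length (K : Nat) (pos : Nat → Nat) (start : List Char) :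
    ((List.range K).foldl (fun res k => res.set (pos k) 'G') start).length = start.length := by
  induction K generalizing start with
  | zero => simp
  | succ K ih =>
    rw [List.range_succ, List.foldl_append]
    simp [ih]

theorem foldl_set_hit (K : Nat) (pos : Nat → Nat) (start : List Char) (n : Nat)
    (hn : n < start.length) (hhit : ∃ k, k < K ∧ pos k = n) :
    ((List.range K).foldl (fun res k => res.set (pos k) 'G') start)[n]? = some 'G' := by
  induction K generalizing start with
  | zero => obtain ⟨k, hk, _⟩ := hhit; omega
  | succ K ih =>
    rw [List.range_succ, List.foldl_append]
    simp only [List.foldl_cons, List.foldl_nil]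
    obtain ⟨k, hk, hkn⟩ := hhit
    by_cases hlast : ∃ k, k < K ∧ pos k = n
    · by_cases hKn : pos K = n
      · rw [hKn, List.getElem?_set_self]
        rw [foldl_set_length]
        simpa using hn
      · rw [List.getElem?_set_ne hKn]
        exact ih start hn hlast
    · have hKn : pos K = n := by
        rcases Nat.lt_succ_iff_lt_or_eq.mp hk with h | h
        · exact absurd ⟨k, h, hkn⟩ hlast
        · rw [← h]; exact hkn
      rw [hKn, List.getElem?_set_self]
      rw [foldl_set_length]
      simpa using hn
theorem foldl_set_miss (K : Nat) (pos : Nat → Nat) (start : List Char) (n : Nat)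
    (hmiss : ∀ k, k < K → pos k ≠ n) :
    ((List.range K).foldl (fun res k => res.set (pos k) 'G') start)[n]? = start[n]? := by
  induction K generalizing start with
  | zero => simp
  | succ K ih =>
    rw [List.range_succ, List.foldl_append]
    simp only [List.foldl_cons, List.foldl_nil]
    rw [List.getElem?_set_ne (hmiss K (by omega)), ih start (fun k hk => hmiss k (by omega))]

-- settleRunB computes the cell picture of xlist
theorem settleRunB_eq_enc (run : List Char) (t : Int) :
    settleRunB run t = enc 0 (xlist (girlsOf run) t) run.length := by
  have hI := girlsOf_pairwise run
  have h0 : ∀ x ∈ girlsOf run, 0 ≤ x := by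
    intro x hx
    obtain ⟨n, hn, rfl, _⟩ := (girlsOf_mem run x).mp hx
    omega
  have hub : ∀ x ∈ girlsOf run, x < (run.length : Int) := by
    intro x hx
    obtain ⟨n, hn, rfl, _⟩ := (girlsOf_mem run x).mp hx
    omega
  set ps := girlsOf run with hps
  apply List.ext_getElem?
  intro n
  unfold settleRunB
  rw [← hps]
  by_cases hn : n < run.length
  · have hxmem : ((n : Int) ∈ xlist ps t) ↔ ∃ k, k < ps.length ∧ bestPos ps t k = (n : Int) := by
      simp [xlist]
    by_cases hhit : ∃ k, k < ps.length ∧ (bestPos ps t k).toNat = n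
    · rw [foldl_set_hit _ _ _ n (by simpa using hn) hhit]
      rw [enc_getElem?, if_pos hn]
      obtain ⟨k, hk, hkn⟩ := hhit
      have h0k := bestPos_nonneg ps t k
      have : (0 : Int) + (n : Int) ∈ xlist ps t := by
        rw [zero_add, hxmem]
        exact ⟨k, hk, by omega⟩
      rw [if_pos this]
    · rw [foldl_set_miss _ _ _ n (fun k hk hkn => hhit ⟨k, hk, hkn⟩)]
      rw [enc_getElem?, if_pos hn]
      have : ¬ ((0 : Int) + (n : Int) ∈ xlist ps t) := by
        rw [zero_add, hxmem]
        rintro ⟨k, hk, he⟩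
        exact hhit ⟨k, hk, by omega⟩
      rw [if_neg this]
      rw [List.getElem?_replicate]
      simp [hn]
  · rw [List.getElem?_eq_none, List.getElem?_eq_none]
    · rw [enc_length]; omega
    · rw [foldl_set_length, List.length_replicate]; omega

-- an all-B/G run is its own cell picture
theorem run_eq_enc (run : List Char) (hbg : ∀ c ∈ run, c = 'B' ∨ c = 'G') :
    run = enc 0 (girlsOf run) run.length := by
  apply List.ext_getElem?
  intro n
  rw [enc_getElem?]
  by_cases hn : n < run.length
  · rw [if_pos hn, List.getElem?_eq_getElem hn]
    congr 1
    by_cases hG : run[n] = 'G'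
    · rw [hG, if_pos]
      rw [zero_add, girlsOf_mem]
      exact ⟨n, hn, rfl, hG⟩
    · have hB : run[n] = 'B' := (hbg _ (List.getElem_mem hn)).resolve_right hG
      rw [hB, if_neg]
      rw [zero_add, girlsOf_mem]
      rintro ⟨n', hn', he, hG'⟩
      have : n' = n := by omega
      exact hG (this ▸ hG')
  · rw [if_neg hn, List.getElem?_eq_none (by omega)]

-- CORE: one run, any number of seconds, in closed form
theorem settleRunB_eq_stepIter (run : List Char) (t : Int) (ht : 0 ≤ t)
    (hbg : ∀ c ∈ run, c = 'B' ∨ c = 'G') :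
    settleRunB run t = stepIter t.toNat run := by
  have hI := girlsOf_pairwise run
  have h0 : ∀ x ∈ girlsOf run, 0 ≤ x := by
    intro x hx
    obtain ⟨n, hn, rfl, _⟩ := (girlsOf_mem run x).mp hx
    omega
  have hub : ∀ x ∈ girlsOf run, x < (run.length : Int) := by
    intro x hx
    obtain ⟨n, hn, rfl, _⟩ := (girlsOf_mem run x).mp hx
    omega
  rw [settleRunB_eq_enc]
  conv_rhs => rw [run_eq_enc run hbg]
  rw [stepIter_enc (girlsOf run) run.length hI h0 hub t.toNat]
  congr 2
  omega

-- ---------- splitting at non-B/G characters ----------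

theorem stepF_cons_notB (x : Char) (v : List Char) (hx : x ≠ 'B') :
    stepF (x :: v) = x :: stepF v := by
  cases v with
  | nil => simp [stepF]
  | cons c v' => rw [stepF, if_neg (fun h => hx h.1)]

theorem stepF_split (x : Char) (hx : x ≠ 'G') :
    ∀ (u v : List Char), stepF (u ++ x :: v) = stepF u ++ stepF (x :: v) := by
  intro u
  induction u using stepF.induct with
  | case1 c1 c2 rest h ih =>
    intro v
    simp only [List.cons_append]
    rw [stepF, if_pos h, stepF, if_pos h, ih]
    simp
  | case2 c1 c2 rest h ih =>
    intro v
    simp only [List.cons_append]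
    rw [stepF, if_neg h]
    conv_rhs => rw [stepF, if_neg h]
    rw [← List.cons_append, ih]
    simp
  | case3 c =>
    intro v
    simp only [List.singleton_append]
    conv_lhs => rw [stepF]
    rw [if_neg (fun h => hx h.2)]
    have e : stepF [c] = [c] := stepF_short [c] (by simp)
    rw [e]
    simp
  | case4 =>
    intro v
    simp [stepF]

theorem stepIter_split (x : Char) (hx1 : x ≠ 'B') (hx2 : x ≠ 'G') :
    ∀ (n : Nat) (u v : List Char),
      stepIter n (u ++ x :: v) = stepIter n u ++ x :: stepIter n v := by
  intro n
  induction n with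
  | zero => intro u v; rfl
  | succ n ih =>
    intro u v
    rw [stepIter, stepF_split x hx2 u v, stepF_cons_notB x v hx1, ih, stepIter, stepIter]

-- ---------- B's outer fold ----------

theorem walk_run (t : Int) (u : List Char) (hbg : ∀ c ∈ u, c = 'B' ∨ c = 'G') :
    ∀ (out acc : List Char), u.foldl (walkStep t) (out, acc) = (out, acc ++ u) := by
  induction u with
  | nil => intro out acc; simp
  | cons c u' ih =>
    intro out acc
    rw [List.foldl_cons, walkStep, if_pos (hbg c List.mem_cons_self)]
    rw [ih (fun d hd => hbg d (List.mem_cons_of_mem _ hd)) out (acc ++ [c])]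
    simp

theorem walk_out_shift (t : Int) :
    ∀ (l : List Char) (out acc : List Char),
      l.foldl (walkStep t) (out, acc)
        = (out ++ (l.foldl (walkStep t) ([], acc)).1, (l.foldl (walkStep t) ([], acc)).2) := by
  intro l
  induction l with
  | nil => intro out acc; simp
  | cons c l' ih =>
    intro out acc
    rw [List.foldl_cons, List.foldl_cons]
    by_cases hc : c = 'B' ∨ c = 'G'
    · have e1 : walkStep t (out, acc) c = (out, acc ++ [c]) := by
        rw [walkStep, if_pos hc]
      have e2 : walkStep t ([], acc) c = ([], acc ++ [c]) := by
        rw [walkStep, if_pos hc]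
      rw [e1, e2]
      exact ih out (acc ++ [c])
    · have e1 : walkStep t (out, acc) c = (out ++ settleRunB acc t ++ [c], []) := by
        rw [walkStep, if_neg hc]
      have e2 : walkStep t ([], acc) c = (settleRunB acc t ++ [c], []) := by
        rw [walkStep, if_neg hc]
        simp
      rw [e1, e2, ih (out ++ settleRunB acc t ++ [c]) [], ih (settleRunB acc t ++ [c]) []]
      simp

theorem dropWhile_head_false (p : Char → Bool) :
    ∀ (l : List Char) (x : Char) (v : List Char), l.dropWhile p = x :: v → p x = false := by
  intro l
  induction l with
  | nil => intro x v h; simp at h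
  | cons a l ih =>
    intro x v h
    rw [List.dropWhile_cons] at h
    by_cases hp : p a
    · rw [if_pos hp] at h
      exact ih x v h
    · rw [if_neg hp] at h
      have : a = x := (List.cons.injEq _ _ _ _ ▸ h).1
      subst this
      simpa using hp

-- the final value B assembles from the fold state
def finishW (t : Int) (cs : List Char) : List Char :=
  (cs.foldl (walkStep t) ([], [])).1 ++ settleRunB (cs.foldl (walkStep t) ([], [])).2 t

theorem finishW_eq_stepIter (t : Int) (ht : 0 ≤ t) :
    ∀ (cs : List Char), finishW t cs = stepIter t.toNat cs := by
  intro cs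
  induction hn : cs.length using Nat.strong_induction_on generalizing cs with
  | _ n IH =>
  subst hn
  by_cases hall : ∀ c ∈ cs, c = 'B' ∨ c = 'G'
  · unfold finishW
    rw [walk_run t cs hall [] []]
    simp only [List.nil_append]
    exact settleRunB_eq_stepIter cs t ht hall
  · -- split at the first non-B/G character
    have hsplit := List.takeWhile_append_dropWhile (p := fun c => c == 'B' || c == 'G') (l := cs)
    set u := cs.takeWhile (fun c => c == 'B' || c == 'G') with hu
    set r := cs.dropWhile (fun c => c == 'B' || c == 'G') with hr
    have hubg : ∀ c ∈ u, c = 'B' ∨ c = 'G' := by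
      intro c hc
      have := List.mem_takeWhile_imp hc
      simpa using this
    cases hrc : r with
    | nil =>
      exfalso
      apply hall
      intro c hc
      rw [← hsplit, hrc, List.append_nil] at hc
      exact hubg c hc
    | cons x v =>
      have hx : ¬ (x == 'B' || x == 'G') = true := by
        have := dropWhile_head_false (fun c => c == 'B' || c == 'G') cs x v (hr ▸ hrc)
        simpa using this
      have hx1 : x ≠ 'B' := by intro h; subst h; simp at hx
      have hx2 : x ≠ 'G' := by intro h; subst h; simp at hx
      have hcs : cs = u ++ x :: v := by rw [← hsplit, hrc]
      rw [hcs]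
      unfold finishW
      rw [List.foldl_append, walk_run t u hubg [] [], List.foldl_cons, List.nil_append]
      have estep : walkStep t ([], u) x = (settleRunB u t ++ [x], []) := by
        rw [walkStep, if_neg (by rintro (h | h) <;> [exact hx1 h; exact hx2 h])]
        simp
      rw [estep, walk_out_shift t v (settleRunB u t ++ [x]) []]
      have hlen : v.length < cs.length := by
        rw [hcs]; simp; omega
      have hIHv : finishW t v = stepIter t.toNat v := IH v.length (by rw [hcs]; simp; omega) v rfl
      unfold finishW at hIHv
      rw [stepIter_split x hx1 hx2 t.toNat u v,
        settleRunB_eq_stepIter u t ht hubg]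
      simp only [List.append_assoc]
      rw [hIHv]
      simp

-- ===== VERDICT (by name: the statement is the Claim_ definition above) =====
theorem moveQueue_spec : Claim_equal_moveQueue := by
  intro size time queue _hdom hpre
  unfold Spec_moveQueue moveQueue moveQueue_alt
  by_cases ht : time ≤ 0
  · have : time.toNat = 0 := by omega
    rw [this]
    simp [ht]
  · have ht0 : 0 ≤ time := by omega
    by_cases hs0 : size ≤ 0
    · have hid : (fun (l : List Char) (_ : Nat) => passA size (size.toNat + 1) 0 l)
          = fun l _ => l := by
        funext l x
        exact passA_id_le_zero size hs0 size.toNat 0 l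
      rw [hid, foldl_const, if_pos (Or.inl hs0)]
      simp
    · rw [if_neg (by omega)]
      simp only
      have hfin : ∀ cs0 : List Char,
          ((cs0.foldl (walkStep time) ([], [])).1
            ++ settleRunB (cs0.foldl (walkStep time) ([], [])).2 time)
          = stepIter time.toNat cs0 := by
        intro cs0
        have := finishW_eq_stepIter time ht0 cs0
        unfold finishW at this
        exact this
      by_cases hs1 : size = 1
      · subst hs1
        have hid : (fun (l : List Char) (_ : Nat) => passA 1 ((1:Int).toNat + 1) 0 l)
            = fun l _ => l := by
          funext l x
          exact passA_id_one l
        rw [hid, foldl_const]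
        rw [hfin]
        have hsh : (queue.toList.take (1:Int).toNat).length ≤ 1 := by
          simp [List.length_take]
        rw [stepIter_fix (stepF_short _ hsh), List.take_append_drop]
      · have hs2 : 2 ≤ size := by omega
        have hlen : size ≤ (queue.toList.length : Int) := by
          rcases hpre with h | h | h
          · omega
          · omega
          · exact h
        rw [foldA size hs2 queue.toList hlen, hfin]
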